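-- pv_equiv track=rewrite | github.com/brittonr/aspen | scripts/tigerstyle-audit.py | strip_comments_preserve_layout
-- ===== SOURCE A (Python) =====
-- def is_char_literal_start(text: str, index: int) -> bool:
--     next_index = index + 1
--     if next_index >= len(text):
--         return False
--     next_char = text[next_index]
--     if next_char == "\\":
--         escape_end = index + 3
--         return escape_end < len(text) and text[escape_end] == "'"
--     char_end = index + 2
--     return char_end < len(text) and text[char_end] == "'"
--
-- def strip_comments_preserve_layout(text: str) -> str:
--     chars: list[str] = []
--     index = 0
--     in_block_comment = False
--     in_line_comment = False
--     in_string = False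
--     in_char = False
--     escape = False
--     while index < len(text):
--         ch = text[index]
--         nxt = text[index + 1] if index + 1 < len(text) else ""
--         if in_line_comment:
--             if ch == "\n":
--                 in_line_comment = False
--                 chars.append(ch)
--             else:
--                 chars.append(" ")
--             index += 1
--             continue
--         if in_block_comment:
--             if ch == "*" and nxt == "/":
--                 chars.extend("  ")
--                 in_block_comment = False
--                 index += 2
--                 continue
--             chars.append("\n" if ch == "\n" else " ")
--             index += 1
--             continue
--         if in_string:
--             chars.append(ch)
--             if escape:
--                 escape = False
--             elif ch == "\\":
--                 escape = True
--             elif ch == '"':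
--                 in_string = False
--             index += 1
--             continue
--         if in_char:
--             chars.append(ch)
--             if escape:
--                 escape = False
--             elif ch == "\\":
--                 escape = True
--             elif ch == "'":
--                 in_char = False
--             index += 1
--             continue
--         if ch == "/" and nxt == "/":
--             chars.extend("  ")
--             in_line_comment = True
--             index += 2
--             continue
--         if ch == "/" and nxt == "*":
--             chars.extend("  ")
--             in_block_comment = True
--             index += 2
--             continue
--         if ch == '"':
--             in_string = True
--             chars.append(ch)
--             index += 1
--             continue
--         if ch == "'":
--             chars.append(ch)
--             if is_char_literal_start(text, index):
--                 in_char = True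
--             index += 1
--             continue
--         chars.append(ch)
--         index += 1
--     return "".join(chars)
-- ===== SOURCE B (Python) =====
-- def is_char_literal_start(text: str, index: int) -> bool:
--     next_index = index + 1
--     if next_index >= len(text):
--         return False
--     next_char = text[next_index]
--     if next_char == "\\":
--         escape_end = index + 3
--         return escape_end < len(text) and text[escape_end] == "'"
--     char_end = index + 2
--     return char_end < len(text) and text[char_end] == "'"
--
--
-- def _scan_quoted(text: str, start: int, quote: str) -> int:
--     """Return the index just past the closing quote (honouring backslash escapes);
--     the quoted body starts at `start` (just after the opening quote)."""
--     j, n = start, len(text)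
--     while j < n:
--         c = text[j]
--         j += 1
--         if c == "\\":
--             j += 1
--         elif c == quote:
--             break
--     return j
--
--
-- def strip_comments_preserve_layout(text: str) -> str:
--     out: list[str] = []
--     i, n = 0, len(text)
--     while i < n:
--         if text.startswith("//", i):
--             j = text.find("\n", i)
--             if j == -1:
--                 j = n
--             out.append(" " * (j - i))
--             i = j
--         elif text.startswith("/*", i):
--             j = text.find("*/", i + 2)
--             end = n if j == -1 else j + 2
--             out.append("".join("\n" if c == "\n" else " " for c in text[i:end]))
--             i = end
--         elif text[i] == '"':
--             j = _scan_quoted(text, i + 1, '"')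
--             out.append(text[i:j])
--             i = j
--         elif text[i] == "'" and is_char_literal_start(text, i):
--             j = _scan_quoted(text, i + 1, "'")
--             out.append(text[i:j])
--             i = j
--         else:
--             out.append(text[i])
--             i += 1
--     return "".join(out)
-- ===== Notes on version B (the rewrite author's own statement) =====
-- stated objective: alternative
-- what changed: Replaces A's one-character-per-iteration five-flag state machine by a chunked scan-and-jump parser: in code mode it dispatches on the next token and consumes whole regions at once (find the newline for // comments, find */ for block comments, a dedicated escape-aware scanner for string/char literals), copying or space-filling each region in one step with no persistent mode flags.
import Mathlib
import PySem

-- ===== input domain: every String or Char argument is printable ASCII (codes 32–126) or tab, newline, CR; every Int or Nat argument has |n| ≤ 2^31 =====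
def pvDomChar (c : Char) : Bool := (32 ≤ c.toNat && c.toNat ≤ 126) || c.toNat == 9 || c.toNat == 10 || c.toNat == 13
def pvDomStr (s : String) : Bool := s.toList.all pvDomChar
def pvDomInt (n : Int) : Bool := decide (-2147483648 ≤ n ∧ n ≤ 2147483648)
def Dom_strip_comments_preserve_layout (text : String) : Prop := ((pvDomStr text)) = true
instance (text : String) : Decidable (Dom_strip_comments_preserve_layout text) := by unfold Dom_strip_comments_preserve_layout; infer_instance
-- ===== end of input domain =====

-- B replaces A's per-character five-flag state machine by a chunked scan-and-jump
-- parser (whole comment/string regions consumed in one step); objective: alternative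
-- decomposition of the same task, not speed.

-- ===== PORT A =====

-- shared module helper is_char_literal_start(text, index), expressed on the suffix
-- text[index:] = ch :: rest (the Python only reads text[index+1..index+3])
def isCharLitStart (rest : List Char) : Bool :=
  match rest with
  | [] => false
  | next :: r2 =>
    if next = '\\' then
      match r2 with
      | _ :: e :: _ => e = '\''
      | _ => false
    else
      match r2 with
      | e :: _ => e = '\''
      | _ => false

-- A's while loop: one character per step, state = (in_block, in_line, in_string,
-- in_char, escape); recursion on the remaining suffix replaces `index`.
def stripA : List Char → Bool → Bool → Bool → Bool → Bool → List Char
  | [], _, _, _, _, _ => []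
  | ch :: rest, inBlock, inLine, inString, inChar, escape =>
    if inLine then
      if ch = '\n' then ch :: stripA rest inBlock false inString inChar escape
      else ' ' :: stripA rest inBlock inLine inString inChar escape
    else if inBlock then
      if ch = '*' ∧ rest.head? = some '/' then
        ' ' :: ' ' :: stripA rest.tail false inLine inString inChar escape
      else
        (if ch = '\n' then '\n' else ' ') :: stripA rest inBlock inLine inString inChar escape
    else if inString then
      ch :: (if escape then stripA rest inBlock inLine inString inChar false
             else if ch = '\\' then stripA rest inBlock inLine inString inChar true
             else if ch = '"' then stripA rest inBlock inLine false inChar escape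
             else stripA rest inBlock inLine inString inChar escape)
    else if inChar then
      ch :: (if escape then stripA rest inBlock inLine inString inChar false
             else if ch = '\\' then stripA rest inBlock inLine inString inChar true
             else if ch = '\'' then stripA rest inBlock inLine inString false escape
             else stripA rest inBlock inLine inString inChar escape)
    else if ch = '/' ∧ rest.head? = some '/' then
      ' ' :: ' ' :: stripA rest.tail inBlock true inString inChar escape
    else if ch = '/' ∧ rest.head? = some '*' then
      ' ' :: ' ' :: stripA rest.tail true inLine inString inChar escape
    else if ch = '"' then
      ch :: stripA rest inBlock inLine true inChar escape
    else if ch = '\'' then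
      ch :: (if isCharLitStart rest then stripA rest inBlock inLine inString true escape
             else stripA rest inBlock inLine inString inChar escape)
    else ch :: stripA rest inBlock inLine inString inChar escape
termination_by l _ _ _ _ _ => l.length
decreasing_by all_goals (simp [List.length_tail]) <;> omega

def strip_comments_preserve_layout (text : String) : String :=
  String.ofList (stripA text.toList false false false false false)

-- ===== PORT B =====

-- text.find("*/", k): split the list at the first "*/" (none if absent)
def splitStarSlash : List Char → Option (List Char × List Char)
  | [] => none
  | c :: rest =>
    if c = '*' ∧ rest.head? = some '/' then some ([], rest.tail)
    else (splitStarSlash rest).map (fun p => (c :: p.1, p.2))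

-- _scan_quoted: consume up to and including the closing quote, honouring
-- backslash escapes; returns (consumed text, remainder)
def scanQuote (q : Char) : List Char → List Char × List Char
  | [] => ([], [])
  | c :: rest =>
    if c = '\\' then
      match rest with
      | [] => ([c], [])
      | d :: rest' =>
        let p := scanQuote q rest'
        (c :: d :: p.1, p.2)
    else if c = q then ([c], rest)
    else
      let p := scanQuote q rest
      (c :: p.1, p.2)

-- "\n" stays, every other character of a block comment becomes a space
def nlSp (c : Char) : Char := if c = '\n' then '\n' else ' '

-- reduction of scanQuote on a cons with a variable head (used below)
theorem scanQuote_cons_self (q : Char) (r : List Char) (hq : ¬q = '\\') :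
    scanQuote q (q :: r) = ([q], r) := by
  rw [scanQuote.eq_def]; simp [hq]

theorem scanQuote_cons_other (q c : Char) (r : List Char) (h1 : ¬c = '\\') (h2 : ¬c = q) :
    scanQuote q (c :: r) = (c :: (scanQuote q r).1, (scanQuote q r).2) := by
  rw [scanQuote.eq_def]; simp [h1, h2]

-- (termination facts for stripB)
theorem splitStarSlash_snd_le : ∀ (l a b : List Char), splitStarSlash l = some (a, b) → b.length ≤ l.length := by
  intro l
  induction l with
  | nil => intro a b h; simp [splitStarSlash] at h
  | cons c rest ih =>
    intro a b h
    simp only [splitStarSlash] at h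
    by_cases hc : c = '*' ∧ rest.head? = some '/'
    · rw [if_pos hc] at h
      simp only [Option.some.injEq, Prod.mk.injEq] at h
      have : rest.tail.length ≤ rest.length := by simp [List.length_tail]
      simp [← h.2]; omega
    · rw [if_neg hc] at h
      cases hs : splitStarSlash rest with
      | none => rw [hs] at h; simp at h
      | some p =>
        rw [hs] at h
        simp only [Option.map_some, Option.some.injEq, Prod.mk.injEq] at h
        have := ih p.1 p.2 (by simp [hs])
        simp [← h.2]; omega

theorem scanQuote_snd_le (q : Char) : ∀ (l : List Char), (scanQuote q l).2.length ≤ l.length := by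
  intro l
  induction l using scanQuote.induct (q := q) with
  | case1 => simp [scanQuote]
  | case2 => simp [scanQuote]
  | case3 next r2 ih => simp [scanQuote]; omega
  | case4 r2 hq => simp [scanQuote_cons_self q r2 hq]
  | case5 next r2 h1 h2 ih => simp [scanQuote_cons_other q next r2 h1 h2]; omega

-- the chunked parser: dispatch on the next token, consume a whole region at once
def stripB : List Char → List Char
  | [] => []
  | ch :: rest =>
    if ch = '/' ∧ rest.head? = some '/' then
      ' ' :: ' ' :: ((rest.tail.takeWhile (· ≠ '\n')).map (fun _ => ' ')
        ++ stripB (rest.tail.dropWhile (· ≠ '\n')))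
    else if ch = '/' ∧ rest.head? = some '*' then
      match hs : splitStarSlash rest.tail with
      | some (a, rest') => ' ' :: ' ' :: (a.map nlSp ++ ' ' :: ' ' :: stripB rest')
      | none => ' ' :: ' ' :: rest.tail.map nlSp
    else if ch = '"' then
      ch :: ((scanQuote '"' rest).1 ++ stripB (scanQuote '"' rest).2)
    else if ch = '\'' ∧ isCharLitStart rest then
      ch :: ((scanQuote '\'' rest).1 ++ stripB (scanQuote '\'' rest).2)
    else ch :: stripB rest
termination_by l => l.length
decreasing_by
  · have h1 := List.length_dropWhile_le (p := fun x => decide (x ≠ '\n')) (l := rest.tail)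
    have h2 : rest.tail.length ≤ rest.length := by simp [List.length_tail]
    simp only [List.length_cons]; omega
  · have h1 := splitStarSlash_snd_le rest.tail a rest' hs
    have h2 : rest.tail.length ≤ rest.length := by simp [List.length_tail]
    simp only [List.length_cons]; omega
  · have h1 := scanQuote_snd_le '"' rest
    simp only [List.length_cons]; omega
  · have h1 := scanQuote_snd_le '\'' rest
    simp only [List.length_cons]; omega
  · simp

def strip_comments_preserve_layout_alt (text : String) : String :=
  String.ofList (stripB text.toList)

-- ===== PRECONDITION & SPEC =====
def Spec_strip_comments_preserve_layout (text : String) (out : String) : Prop := out = strip_comments_preserve_layout_alt text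
instance (text : String) (out : String) : Decidable (Spec_strip_comments_preserve_layout text out) := by unfold Spec_strip_comments_preserve_layout; infer_instance

-- ===== CLAIM (what is proved, stated in full; the proofs are below) =====
def Claim_equal_strip_comments_preserve_layout : Prop := ∀ (text : String), Dom_strip_comments_preserve_layout text → Spec_strip_comments_preserve_layout text (strip_comments_preserve_layout text)

-- ===== LEMMAS AND PROOFS =====

-- line-comment mode = spaces up to the newline, then back to code mode
theorem lineLemma : ∀ (l : List Char),
    stripA l false true false false false =
      (l.takeWhile (· ≠ '\n')).map (fun _ => ' ')
        ++ stripA (l.dropWhile (· ≠ '\n')) false false false false false := by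
  intro l
  induction l with
  | nil => simp [stripA]
  | cons c r ih =>
    by_cases hc : c = '\n'
    · subst hc
      simp [stripA, List.takeWhile, List.dropWhile]
    · simp [stripA, hc, List.takeWhile, List.dropWhile, ih]

-- block-comment mode = nlSp up to "*/", two spaces for "*/", then code mode
theorem blockLemma : ∀ (l : List Char),
    stripA l true false false false false =
      (match splitStarSlash l with
       | some (a, rest) => a.map nlSp ++ ' ' :: ' ' :: stripA rest false false false false false
       | none => l.map nlSp) := by
  intro l
  induction l with
  | nil => simp [stripA, splitStarSlash]
  | cons c rest ih =>
    by_cases hc : c = '*' ∧ rest.head? = some '/'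
    · simp [stripA, splitStarSlash, hc]
    · simp only [stripA, splitStarSlash, if_neg hc]
      cases hs : splitStarSlash rest with
      | none => simp [hs, ih, nlSp]
      | some p => simp [hs, ih, nlSp]

-- string-literal mode = verbatim copy through the closing quote, then code mode
theorem strLemma : ∀ (l : List Char),
    stripA l false false true false false =
      (scanQuote '"' l).1 ++ stripA (scanQuote '"' l).2 false false false false false := by
  intro l
  induction l using scanQuote.induct (q := '"') with
  | case1 => simp [stripA, scanQuote]
  | case2 => simp [stripA, scanQuote]
  | case3 next r2 ih => simp [stripA, scanQuote, ih]
  | case4 r2 hq => simp [stripA, scanQuote_cons_self _ r2 hq]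
  | case5 next r2 h1 h2 ih => simp [stripA, scanQuote_cons_other _ next r2 h1 h2, h1, h2, ih]

-- char-literal mode = verbatim copy through the closing quote, then code mode
theorem charLemma : ∀ (l : List Char),
    stripA l false false false true false =
      (scanQuote '\'' l).1 ++ stripA (scanQuote '\'' l).2 false false false false false := by
  intro l
  induction l using scanQuote.induct (q := '\'') with
  | case1 => simp [stripA, scanQuote]
  | case2 => simp [stripA, scanQuote]
  | case3 next r2 ih => simp [stripA, scanQuote, ih]
  | case4 r2 hq => simp [stripA, scanQuote_cons_self _ r2 hq]
  | case5 next r2 h1 h2 ih => simp [stripA, scanQuote_cons_other _ next r2 h1 h2, h1, h2, ih]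

-- the two parsers agree from code mode
theorem mainLemma : ∀ (l : List Char),
    stripA l false false false false false = stripB l := by
  intro l
  induction l using stripB.induct with
  | case1 => simp [stripA, stripB]
  | case2 next r2 h ih =>
    obtain ⟨h1, h2⟩ := h
    subst h1
    simp [stripA, stripB, h2, lineLemma]
    simpa using ih
  | case3 next r2 h1 h2 a rest' hs ih =>
    obtain ⟨h2a, h2b⟩ := h2
    subst h2a
    simp [stripA, stripB, h2b, blockLemma, hs, ih]
    split <;> simp_all
  | case4 next r2 h1 h2 hs =>
    obtain ⟨h2a, h2b⟩ := h2
    subst h2a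
    simp [stripA, stripB, h2b, blockLemma, hs]
    split <;> simp_all
  | case5 r2 h1 h2 ih =>
    simp [stripA, stripB, h1, h2, strLemma, ih]
  | case6 next r2 h1 h2 h3 h ih =>
    obtain ⟨h4a, h4b⟩ := h
    subst h4a
    simp [stripA, stripB, h4b, charLemma, ih]
  | case7 next r2 h1 h2 h3 h4 ih =>
    by_cases hq : next = '\''
    · subst hq
      simp only [true_and] at h4
      simp at h4
      simp [stripA, stripB, h1, h2, h4, ih]
    · simp [stripA, stripB, h1, h2, h3, h4, hq, ih]

-- ===== VERDICT (by name: the statement is the Claim_ definition above) =====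
theorem strip_comments_preserve_layout_spec : Claim_equal_strip_comments_preserve_layout := by
  intro text _
  unfold Spec_strip_comments_preserve_layout strip_comments_preserve_layout strip_comments_preserve_layout_alt
  rw [mainLemma]
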